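-- pv_equiv track=rewrite | github.com/legend507/MyLeetCodeSolutions | Additional/largest_subsequence.py | largest_subsequence
-- ===== SOURCE A (Python) =====
-- def largest_subsequence(S, K):
--     # Convert the sequence S to a string to handle digits easily
--     S = str(S)
--     stack = []
--     n = len(S)
--     to_remove = n - K  # The number of digits we can remove to keep K digits
--
--     for digit in S:
--         # Ensure we have the largest possible digits in the stack
--         while to_remove > 0 and stack and stack[-1] < digit:
--             stack.pop()  # Remove the smaller digits
--             to_remove -= 1
--         stack.append(digit)
--
--     # The result is the first K digits from the stack
--     return ''.join(stack[:K])
-- ===== SOURCE B (Python) =====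
-- def pick(s, k):
--     # choose k chars greedily: leftmost max of the allowed window, then recurse
--     if k == 0:
--         return []
--     w = s[:len(s) - k + 1]
--     j, best = 0, w[0]
--     for i in range(1, len(w)):
--         if best < w[i]:
--             j, best = i, w[i]
--     return [best] + pick(s[j + 1:], k - 1)
--
-- def largest_subsequence(S, K):
--     s = str(S)
--     n = len(s)
--     if K <= 0:
--         return ''
--     if K >= n:
--         return s
--     return ''.join(pick(s, K))
-- ===== Notes on version B (the rewrite author's own statement) =====
-- stated objective: alternative
-- what changed: Replaces the single-pass monotonic stack with a removal budget by recursive greedy selection: each output digit is the leftmost maximum of the still-feasible window, recursing on the remaining suffix.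
-- outside the precondition, e.g. on largest_subsequence(321, -1): A returns '32', B returns ''
import Mathlib
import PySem

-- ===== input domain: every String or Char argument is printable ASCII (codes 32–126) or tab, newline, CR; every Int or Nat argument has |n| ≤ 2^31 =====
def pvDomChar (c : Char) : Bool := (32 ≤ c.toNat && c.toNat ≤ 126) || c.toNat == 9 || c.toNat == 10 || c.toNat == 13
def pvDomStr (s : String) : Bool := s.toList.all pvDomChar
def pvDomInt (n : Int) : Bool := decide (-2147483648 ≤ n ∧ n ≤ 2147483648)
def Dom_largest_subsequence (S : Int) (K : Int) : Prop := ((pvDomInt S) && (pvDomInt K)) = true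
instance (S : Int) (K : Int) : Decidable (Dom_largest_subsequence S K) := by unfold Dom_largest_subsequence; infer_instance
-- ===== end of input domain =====

-- B replaces A's monotonic stack (single pass with a pop budget) by recursive greedy
-- selection of the leftmost window maximum; same result, different algorithm.

-- ===== PORT A =====
-- A's 'while to_remove > 0 and stack and stack[-1] < digit: stack.pop(); to_remove -= 1'.
-- The stack is kept top-first (head = Python's stack[-1]); it is reversed before slicing.
def popLoop (rst : List Char) (r : Int) (d : Char) : List Char × Int :=
  match rst with
  | [] => ([], r)
  | t :: rest => if 0 < r ∧ t < d then popLoop rest (r - 1) d else (t :: rest, r)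

-- 'for digit in S: <while loop>; stack.append(digit)'
def procA (ds : List Char) (st : List Char × Int) : List Char × Int :=
  match ds with
  | [] => st
  | d :: ds' =>
      let p := popLoop st.1 st.2 d
      procA ds' (d :: p.1, p.2)

def largest_subsequence (S : Int) (K : Int) : String :=
  let s := PySem.Int.toStr S
  let n : Int := (s.toList.length : Int)
  let stack := (procA s.toList ([], n - K)).1.reverse
  String.mk (PySem.List.slice stack none (some K))   -- ''.join(stack[:K])

-- ===== PORT B =====
-- leftmost maximum scan: 'for i in range(1, len(w)): if best < w[i]: j, best = i, w[i]'
def argmaxFrom (cs : List Char) (i : Nat) (bj : Nat) (bc : Char) : Nat × Char :=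
  match cs with
  | [] => (bj, bc)
  | c :: cs' => if bc < c then argmaxFrom cs' (i + 1) i c else argmaxFrom cs' (i + 1) bj bc

def pick (s : List Char) (k : Nat) : List Char :=
  match k with
  | 0 => []
  | k' + 1 =>
    match s.take (s.length - k') with   -- w = s[:len(s)-k+1]
    | [] => []
    | c :: cs =>
        let p := argmaxFrom cs 1 0 c
        p.2 :: pick (s.drop (p.1 + 1)) k'

def largest_subsequence_alt (S : Int) (K : Int) : String :=
  let s := PySem.Int.toStr S
  let n : Int := (s.toList.length : Int)
  if K ≤ 0 then ""
  else if n ≤ K then s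
  else String.mk (pick s.toList K.toNat)

-- ===== PRECONDITION & SPEC =====
-- Pre_ excludes negative K, outside the task's natural domain ("keep K digits"): there A's
-- 'stack[:K]' negative slicing yields an accidental value, while B naturally returns ''.
def Pre_largest_subsequence (S : Int) (K : Int) : Prop := 0 ≤ K
instance (S : Int) (K : Int) : Decidable (Pre_largest_subsequence S K) := by unfold Pre_largest_subsequence; infer_instance
def pvWitness_largest_subsequence : Int × Int := (1526374, 3)

def Spec_largest_subsequence (S : Int) (K : Int) (out : String) : Prop := out = largest_subsequence_alt S K
instance (S : Int) (K : Int) (out : String) : Decidable (Spec_largest_subsequence S K out) := by unfold Spec_largest_subsequence; infer_instance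

-- ===== CLAIM (what is proved, stated in full; the proofs are below) =====
def Claim_equal_largest_subsequence : Prop := ∀ (S : Int) (K : Int), Dom_largest_subsequence S K → Pre_largest_subsequence S K → Spec_largest_subsequence S K (largest_subsequence S K)

-- ===== LEMMAS AND PROOFS =====


theorem popLoop_nonpos (rst : List Char) (r : Int) (d : Char) (h : r ≤ 0) :
    popLoop rst r d = (rst, r) := by
  cases rst with
  | nil => rfl
  | cons t rest => simp [popLoop]; omega

theorem procA_nonpos (ds : List Char) (rst : List Char) (r : Int) (h : r ≤ 0) :
    procA ds (rst, r) = (ds.reverse ++ rst, r) := by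
  induction ds generalizing rst with
  | nil => simp [procA]
  | cons d ds' ih => simp [procA, popLoop_nonpos _ _ _ h, ih]

theorem procA_append (xs ys : List Char) (st : List Char × Int) :
    procA (xs ++ ys) st = procA ys (procA xs st) := by
  induction xs generalizing st with
  | nil => simp [procA]
  | cons x xs' ih => simp [procA, ih]

theorem popLoop_spec (rst : List Char) (r : Int) (d : Char) :
    ∃ m : Nat, m ≤ rst.length ∧ popLoop rst r d = (rst.drop m, r - m) := by
  induction rst generalizing r with
  | nil => exact ⟨0, by simp [popLoop]⟩
  | cons t rest ih =>
    by_cases h : 0 < r ∧ t < d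
    · obtain ⟨m, hm, heq⟩ := ih (r - 1)
      exact ⟨m + 1, by simpa using hm, by simp [popLoop, h, heq]; push_cast; omega⟩
    · exact ⟨0, by simp [popLoop, h]⟩

theorem popLoop_clear (rst : List Char) (r : Int) (d : Char)
    (hlt : ∀ c ∈ rst, c < d) (hr : (rst.length : Int) ≤ r) :
    popLoop rst r d = ([], r - rst.length) := by
  induction rst generalizing r with
  | nil => simp [popLoop]
  | cons t rest ih =>
    have h1 : (0:Int) < r := by simp only [List.length_cons] at hr; omega
    have h2 : t < d := hlt t (by simp)
    rw [popLoop]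
    simp only [h1, h2, and_self, if_true]
    rw [ih (r - 1) (fun c hc => hlt c (by simp [hc]))
      (by simp only [List.length_cons] at hr; push_cast at hr ⊢; omega)]
    simp only [List.length_cons, Prod.mk.injEq, true_and]
    push_cast
    ring

theorem popLoop_bottom (q : List Char) (r : Int) (x d : Char)
    (h : 0 < r - q.length → x ≤ d) :
    popLoop (q ++ [d]) r x = ((popLoop q r x).1 ++ [d], (popLoop q r x).2) := by
  induction q generalizing r with
  | nil =>
    simp at h
    by_cases hr : 0 < r
    · have hxd : ¬ d < x := not_lt.mpr (h hr)
      simp [popLoop, hr, hxd]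
    · simp [popLoop, hr]
  | cons y q' ih =>
    by_cases hc : 0 < r ∧ y < x
    · simp only [List.cons_append, popLoop, hc, and_self, if_true]
      exact ih (r - 1) (by simp at h ⊢; intro h'; exact h (by omega))
    · simp [popLoop, hc]

theorem procA_clear (p : List Char) (d : Char) (rst : List Char) (r : Int)
    (hp : ∀ c ∈ p, c < d) (hrst : ∀ c ∈ rst, c < d)
    (hr : (p.length : Int) + rst.length ≤ r) :
    procA (p ++ [d]) (rst, r) = ([d], r - p.length - rst.length) := by
  induction p generalizing rst r with
  | nil =>
    simp only [List.nil_append, procA]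
    rw [popLoop_clear rst r d hrst (by simp at hr; omega)]
    simp
  | cons a p' ih =>
    simp only [List.cons_append, procA]
    obtain ⟨m, hm, heq⟩ := popLoop_spec rst r a
    rw [heq]
    have hsub : ∀ c ∈ rst.drop m, c < d := fun c hc => hrst c (List.mem_of_mem_drop hc)
    have := ih (a :: rst.drop m)  (r - m)
      (fun c hc => hp c (by simp [hc]))
      (by intro c hc; rcases List.mem_cons.1 hc with h | h
          · exact h ▸ hp a (by simp)
          · exact hsub c h)
      (by simp [List.length_drop] at *; omega)
    rw [this]
    simp only [List.length_cons, List.length_drop]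
    congr 1
    omega

theorem procA_bottom (t : List Char) (q : List Char) (b : Int) (d : Char)
    (h : ∀ (p : Nat) (hp : p < t.length), (p : Int) < b - q.length → t[p] ≤ d) :
    procA t (q ++ [d], b) = ((procA t (q, b)).1 ++ [d], (procA t (q, b)).2) := by
  induction t generalizing q b with
  | nil => simp [procA]
  | cons x t' ih =>
    have hx : 0 < b - (q.length : Int) → x ≤ d := fun h' => h 0 (by simp) (by simpa using h')
    simp only [procA]
    rw [popLoop_bottom q b x d hx]
    obtain ⟨m, hm, heq⟩ := popLoop_spec q b x
    rw [heq]
    simp only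
    have : x :: (q.drop m ++ [d]) = (x :: q.drop m) ++ [d] := by simp
    rw [this]
    rw [ih (x :: q.drop m) (b - m)
      (by intro p hp hlt
          have := h (p + 1) (by simpa using Nat.succ_lt_succ hp)
            (by simp [List.length_drop] at hlt ⊢; omega)
          simpa using this)]

theorem procA_decomp (s : List Char) (r : Int) (j : Nat) (hj : j < s.length)
    (_hr0 : 0 ≤ r) (hjr : (j : Int) ≤ r)
    (hlt : ∀ i (h : i < j), s[i]'(by omega) < s[j])
    (hle : ∀ i (h : i < s.length), j < i → (i : Int) ≤ r → s[i] ≤ s[j]) :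
    (procA s ([], r)).1 = (procA (s.drop (j+1)) ([], r - j)).1 ++ [s[j]] := by
  have hd : s.drop j = s[j] :: s.drop (j+1) := List.drop_eq_getElem_cons hj
  have hsplit : s = (s.take j ++ [s[j]]) ++ s.drop (j+1) := by
    conv_lhs => rw [← List.take_append_drop j s, hd]
    simp
  conv_lhs => rw [hsplit]
  rw [procA_append]
  rw [procA_clear (s.take j) (s[j]) [] r
    (by intro c hc
        obtain ⟨i, hi, hieq⟩ := List.mem_take_iff_getElem.1 hc
        subst hieq
        have h2 : i < j := lt_of_lt_of_le hi (by simp)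
        simpa using hlt i h2)
    (by simp) (by simp [List.length_take]; omega)]
  have hlen : (s.take j).length = j := by simp; omega
  rw [hlen]
  have hb := procA_bottom (s.drop (j+1)) [] (r - j) (s[j])
    (by intro p hp hlt'
        simp only [List.length_nil, Nat.cast_zero, sub_zero] at hlt'
        rw [List.getElem_drop]
        exact hle (j+1+p) (by simp at hp; omega) (by omega) (by push_cast at hlt' ⊢; omega))
  simp only [List.nil_append] at hb
  simp only [List.length_nil, Nat.cast_zero, sub_zero]
  rw [hb]

theorem argmax_spec (cs : List Char) (i bj : Nat) (bc : Char) :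
    (argmaxFrom cs i bj bc = (bj, bc) ∧ ∀ c ∈ cs, c ≤ bc) ∨
    (∃ p, ∃ hp : p < cs.length, argmaxFrom cs i bj bc = (i + p, cs[p]) ∧ bc < cs[p] ∧
      (∀ q (hq : q < cs.length), q < p → cs[q] < cs[p]) ∧
      (∀ q (hq : q < cs.length), cs[q] ≤ cs[p])) := by
  induction cs generalizing i bj bc with
  | nil => left; simp [argmaxFrom]
  | cons c cs' ih =>
    by_cases hc : bc < c
    · right
      rcases ih (i+1) i c with ⟨heq, hall⟩ | ⟨p, hp, heq, hlt, hbefore, hall⟩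
      · refine ⟨0, by simp, ?_, by simpa using hc, ?_, ?_⟩
        · simpa [argmaxFrom, hc] using heq
        · intro q hq h; exact absurd h (by omega)
        · intro q hq
          cases q with
          | zero => simp
          | succ q' => simpa using hall _ (by simp at hq; exact List.getElem_mem _)
      · refine ⟨p + 1, by simpa using Nat.succ_lt_succ hp, ?_, ?_, ?_, ?_⟩
        · simp only [argmaxFrom, hc, if_true]
          rw [heq]
          simp [Prod.ext_iff]
          omega
        · simpa using lt_trans hc hlt
        · intro q hq hqp
          cases q with
          | zero => simpa using hlt
          | succ q' => simpa using hbefore q' (by simpa using hq) (by omega)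
        · intro q hq
          cases q with
          | zero => simpa using le_of_lt hlt
          | succ q' => simpa using hall q' (by simpa using hq)
    · rcases ih (i+1) bj bc with ⟨heq, hall⟩ | ⟨p, hp, heq, hlt, hbefore, hall⟩
      · left
        refine ⟨by simpa [argmaxFrom, hc] using heq, ?_⟩
        intro x hx
        rcases List.mem_cons.1 hx with h | h
        · exact h ▸ not_lt.mp hc
        · exact hall x h
      · right
        refine ⟨p + 1, by simpa using Nat.succ_lt_succ hp, ?_, ?_, ?_, ?_⟩
        · simp only [argmaxFrom, hc, if_false]
          rw [heq]
          simp [Prod.ext_iff]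
          omega
        · simpa using hlt
        · intro q hq hqp
          cases q with
          | zero =>
            have hcbc : c ≤ bc := not_lt.mp hc
            simpa using lt_of_le_of_lt hcbc hlt
          | succ q' => simpa using hbefore q' (by simpa using hq) (by omega)
        · intro q hq
          cases q with
          | zero =>
            have hcbc : c ≤ bc := not_lt.mp hc
            simpa using le_trans hcbc (le_of_lt hlt)
          | succ q' => simpa using hall q' (by simpa using hq)

theorem argmax_window (c : Char) (cs : List Char) :
    ∃ j, ∃ hj : j < (c :: cs).length,
      argmaxFrom cs 1 0 c = (j, (c :: cs)[j]) ∧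
      (∀ q (hq : q < (c :: cs).length), q < j → (c :: cs)[q] < (c :: cs)[j]) ∧
      (∀ q (hq : q < (c :: cs).length), (c :: cs)[q] ≤ (c :: cs)[j]) := by
  rcases argmax_spec cs 1 0 c with ⟨heq, hall⟩ | ⟨p, hp, heq, hlt, hbef, hall⟩
  · refine ⟨0, by simp, by simpa using heq, ?_, ?_⟩
    · intro q hq h; exact absurd h (by omega)
    · intro q hq
      cases q with
      | zero => simp
      | succ q' => simpa using hall _ (List.getElem_mem _)
  · refine ⟨p + 1, by simpa using Nat.succ_lt_succ hp, ?_, ?_, ?_⟩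
    · rw [heq, Prod.mk.injEq]
      exact ⟨by omega, by simp⟩
    · intro q hq hqj
      cases q with
      | zero => simpa using hlt
      | succ q' => simpa using hbef q' (by simpa using hq) (by omega)
    · intro q hq
      cases q with
      | zero => simpa using le_of_lt hlt
      | succ q' => simpa using hall q' (by simpa using hq)

theorem main_lemma : ∀ (k : Nat) (s : List Char), k ≤ s.length →
    ((procA s ([], (s.length : Int) - k)).1.reverse).take k = pick s k := by
  intro k
  induction k with
  | zero => intro s _; simp [pick]
  | succ k ih =>
    intro s hk
    have hk1 : k + 1 ≤ s.length := hk
    have hwlen : (s.take (s.length - k)).length = s.length - k := by simp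
    obtain ⟨c, cs, hcs⟩ : ∃ c cs, s.take (s.length - k) = c :: cs := by
      cases h : s.take (s.length - k) with
      | nil => rw [h] at hwlen; simp at hwlen; omega
      | cons c cs => exact ⟨c, cs, rfl⟩
    obtain ⟨j, hj, heq, hbef, hall⟩ := argmax_window c cs
    have hclen : (c :: cs).length = s.length - k := by rw [← hcs]; exact hwlen
    have hjw : j < s.length - k := by omega
    have hjs : j < s.length := by omega
    have hgw : ∀ q (hq : q < (c :: cs).length), (c :: cs)[q] = s[q]'(by omega) := by
      intro q hq
      have hq' : q < (s.take (s.length - k)).length := by rw [hcs]; exact hq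
      have e1 : (s.take (s.length - k))[q]'hq' = (c :: cs)[q] := List.getElem_of_eq hcs hq'
      rw [← e1]
      exact List.getElem_take
    have hdec := procA_decomp s ((s.length : Int) - (k + 1)) j hjs
      (by omega)
      (by omega)
      (by intro i hi
          rw [← hgw i (by omega), ← hgw j hj]
          exact hbef i (by omega) hi)
      (by intro i hilen hji hir
          have hiw : i < s.length - k := by omega
          rw [← hgw i (by omega), ← hgw j hj]
          exact hall i (by omega))
    have hcast : ((s.length : Int) - (k + 1 : Nat)) = ((s.length : Int) - (k + 1)) := by
      push_cast; ring
    rw [hcast, hdec]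
    rw [pick]
    rw [hcs]
    simp only [heq, List.reverse_append, List.reverse_cons, List.reverse_nil,
      List.nil_append, List.singleton_append, List.take_succ_cons]
    rw [hgw j hj]
    congr 1
    have hlen2 : k ≤ (s.drop (j + 1)).length := by simp; omega
    have := ih (s.drop (j + 1)) hlen2
    rw [← this]
    congr 2
    simp only [List.length_drop]
    push_cast [Nat.cast_sub (by omega : j + 1 ≤ s.length)]
    ring


-- ===== VERDICT (by name: the statement is the Claim_ definition above) =====
theorem largest_subsequence_spec : Claim_equal_largest_subsequence := by
  intro S K _ hK
  unfold Spec_largest_subsequence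
  simp only [largest_subsequence, largest_subsequence_alt]
  rw [PySem.List.slice_to _ hK]
  by_cases hK0 : K ≤ 0
  · have h0 : K = 0 := le_antisymm hK0 hK
    subst h0
    simp
    rfl
  · rw [if_neg hK0]
    by_cases hnK : (((PySem.Int.toStr S).toList.length : Int) : Int) ≤ K
    · rw [if_pos hnK]
      rw [procA_nonpos _ _ _ (by omega)]
      simp only [List.append_nil, List.reverse_reverse]
      rw [List.take_of_length_le (by omega)]
      exact String.ofList_toList
    · rw [if_neg hnK]
      have hkn : K.toNat ≤ (PySem.Int.toStr S).toList.length := by omega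
      have hb : ((PySem.Int.toStr S).toList.length : Int) - K
          = ((PySem.Int.toStr S).toList.length : Int) - (K.toNat : Int) := by
        rw [Int.toNat_of_nonneg hK]
      rw [hb, main_lemma K.toNat _ hkn]
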